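-- pv_equiv track=rewrite | github.com/pantoniou/libfyaml | python-libfyaml/libfyaml/pyyaml_compat/__init__.py | _resolve_tag_handle
-- ===== SOURCE A (Python) =====
-- def _resolve_tag_handle(tag, tag_handles):
--     """Resolve a tag handle like '!yaml!str' to its full form using tag directives.
--
--     Args:
--         tag: Tag string that may contain an unresolved handle
--         tag_handles: Dict mapping handles to prefixes (from DocumentStartEvent)
--
--     Returns:
--         Resolved tag string
--     """
--     if tag is None or not tag_handles:
--         return tag
--     # Already resolved (starts with a known URI scheme)
--     if tag.startswith('tag:') or tag.startswith('http:') or tag.startswith('https:'):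
--         return tag
--     # Try to match tag handles (longest first for specificity)
--     for handle in sorted(tag_handles.keys(), key=len, reverse=True):
--         if not handle:
--             continue
--         if tag.startswith(handle):
--             prefix = tag_handles[handle]
--             suffix = tag[len(handle):]
--             return prefix + suffix
--     # Single '!' prefix (primary tag handle)
--     if tag.startswith('!') and '!' in tag_handles:
--         # Only for local tags like '!foo' where '!' maps to a prefix
--         handle = '!'
--         prefix = tag_handles[handle]
--         if prefix != '!':
--             suffix = tag[1:]
--             return prefix + suffix
--     return tag
-- ===== SOURCE B (Python) =====
-- def _resolve_tag_handle(tag, tag_handles):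
--     """Resolve a tag handle like '!yaml!str' to its full form using tag directives.
--
--     Single pass: among the non-empty handles that are a prefix of the tag, keep
--     the longest one (no sort). A's trailing '!' special-case is unreachable --
--     a '!' handle that applies is always found by the scan -- so it is dropped.
--     """
--     if tag is None or not tag_handles:
--         return tag
--     if tag.startswith('tag:') or tag.startswith('http:') or tag.startswith('https:'):
--         return tag
--     best = None
--     for handle, prefix in tag_handles.items():
--         if handle and tag.startswith(handle):
--             if best is None or len(best[0]) < len(handle):
--                 best = (handle, prefix)
--     if best is not None:
--         return best[1] + tag[len(best[0]):]
--     return tag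
-- ===== Notes on version B (the rewrite author's own statement) =====
-- stated objective: simpler
-- what changed: Replaces the sort-handles-by-length-then-first-match loop by a single unsorted pass over the items keeping the longest matching handle, and drops A's unreachable trailing '!' fallback (any applicable '!' handle is already found by the scan).
import Mathlib
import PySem

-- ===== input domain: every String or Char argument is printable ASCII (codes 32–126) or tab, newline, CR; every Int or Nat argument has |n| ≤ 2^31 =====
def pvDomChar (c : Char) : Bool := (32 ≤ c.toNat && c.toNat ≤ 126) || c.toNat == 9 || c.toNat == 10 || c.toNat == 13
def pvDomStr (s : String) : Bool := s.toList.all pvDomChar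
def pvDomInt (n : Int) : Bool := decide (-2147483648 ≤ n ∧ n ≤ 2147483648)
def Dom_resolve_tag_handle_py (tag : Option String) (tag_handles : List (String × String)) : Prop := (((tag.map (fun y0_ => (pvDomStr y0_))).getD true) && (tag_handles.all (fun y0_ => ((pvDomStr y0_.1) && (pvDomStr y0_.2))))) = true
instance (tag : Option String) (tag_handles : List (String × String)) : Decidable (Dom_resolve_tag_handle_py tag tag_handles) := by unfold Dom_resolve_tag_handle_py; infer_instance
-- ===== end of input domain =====

-- B replaces A's sort-by-length-then-first-match by one unsorted longest-match pass and drops A's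
-- unreachable trailing '!' fallback; objective: simpler. Equivalence of the RETURN value is proved below.

-- ===== PORT A =====
-- the 'for handle in sorted(...)' loop of A: skip empty handles, return on the first prefix match
def pvLoopA (t : String) (d : PySem.Dict String String) : List String → Option String
  | [] => none
  | h :: rest =>
    if h == "" then pvLoopA t d rest
    else if PySem.Str.startswith t h then
      some (d.getD h "" ++ PySem.Str.slice t (some (PySem.Str.len h)) none)   -- tag_handles[handle] + tag[len(handle):]
    else pvLoopA t d rest

def resolve_tag_handle_py (tag : Option String) (tag_handles : List (String × String)) : Option String :=
  match tag with
  | none => none                                   -- 'if tag is None: return tag'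
  | some t =>
    let d := PySem.Dict.ofList tag_handles
    if d.size = 0 then some t                      -- 'if not tag_handles: return tag'
    else if PySem.Str.startswith t "tag:" || PySem.Str.startswith t "http:" || PySem.Str.startswith t "https:" then some t
    else
      match pvLoopA t d (PySem.List.sorted d.keys (fun h => PySem.Str.len h) true) with
      | some r => some r
      | none =>
        if PySem.Str.startswith t "!" && d.contains "!" then
          let prefx := d.getD "!" ""               -- tag_handles['!'] ('!' is in the dict here)
          if prefx != "!" then some (prefx ++ PySem.Str.slice t (some 1) none)   -- prefix + tag[1:]
          else some t
        else some t

-- ===== PORT B =====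
-- one step of B's scan: keep the longest matching handle seen so far (pair (handle, prefix))
def pvStepB (t : String) (best : Option (String × String)) (hp : String × String) : Option (String × String) :=
  if hp.1 != "" && PySem.Str.startswith t hp.1 then
    match best with
    | none => some hp
    | some b => if PySem.Str.len b.1 < PySem.Str.len hp.1 then some hp else best
  else best

def resolve_tag_handle_py_alt (tag : Option String) (tag_handles : List (String × String)) : Option String :=
  match tag with
  | none => none
  | some t =>
    let d := PySem.Dict.ofList tag_handles
    if d.size = 0 then some t
    else if PySem.Str.startswith t "tag:" || PySem.Str.startswith t "http:" || PySem.Str.startswith t "https:" then some t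
    else
      match d.items.foldl (pvStepB t) none with
      | some b => some (b.2 ++ PySem.Str.slice t (some (PySem.Str.len b.1)) none)   -- best[1] + tag[len(best[0]):]
      | none => some t

-- ===== PRECONDITION & SPEC =====
def Spec_resolve_tag_handle_py (tag : Option String) (tag_handles : List (String × String)) (out : Option String) : Prop := out = resolve_tag_handle_py_alt tag tag_handles
instance (tag : Option String) (tag_handles : List (String × String)) (out : Option String) : Decidable (Spec_resolve_tag_handle_py tag tag_handles out) := by unfold Spec_resolve_tag_handle_py; infer_instance

-- ===== CLAIM (what is proved, stated in full; the proofs are below) =====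
def Claim_equal_resolve_tag_handle_py : Prop := ∀ (tag : Option String) (tag_handles : List (String × String)), Dom_resolve_tag_handle_py tag tag_handles → Spec_resolve_tag_handle_py tag tag_handles (resolve_tag_handle_py tag tag_handles)

-- ===== LEMMAS AND PROOFS =====

-- the Boolean 'this handle matches' test shared by the reasoning below
def pvP (t h : String) : Bool := (h != "") && PySem.Str.startswith t h

-- pvStepB's test is exactly pvP
theorem pvStepB_eq (t : String) (best : Option (String × String)) (hp : String × String) :
    pvStepB t best hp = if pvP t hp.1 then
      (match best with
       | none => some hp
       | some b => if PySem.Str.len b.1 < PySem.Str.len hp.1 then some hp else best)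
      else best := rfl

theorem pvStepB_false (t : String) (acc : Option (String × String)) (hp : String × String)
    (h : pvP t hp.1 = false) : pvStepB t acc hp = acc := by
  rw [pvStepB_eq, h]; rfl

theorem pvStepB_true_none (t : String) (hp : String × String)
    (h : pvP t hp.1 = true) : pvStepB t none hp = some hp := by
  rw [pvStepB_eq, h]; simp

theorem pvStepB_true_some (t : String) (b hp : String × String)
    (h : pvP t hp.1 = true) : pvStepB t (some b) hp =
      if PySem.Str.len b.1 < PySem.Str.len hp.1 then some hp else some b := by
  rw [pvStepB_eq, h]; simp

-- A's loop is find? of the first matching handle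
theorem pvLoopA_eq_find (t : String) (d : PySem.Dict String String) (l : List String) :
    pvLoopA t d l = (l.find? (pvP t)).map
      (fun h => d.getD h "" ++ PySem.Str.slice t (some (PySem.Str.len h)) none) := by
  induction l with
  | nil => rfl
  | cons h rest ih =>
    simp only [pvLoopA]
    by_cases h0 : h == ""
    · rw [List.find?_cons_of_neg (by simp [pvP]; intro hne; exact absurd (by simpa using h0) hne),
        if_pos h0]
      exact ih
    · rw [if_neg h0]
      by_cases hs : PySem.Str.startswith t h
      · rw [List.find?_cons_of_pos
          (by simp [pvP]; exact ⟨fun hh => h0 (by simp [hh]), by simpa using hs⟩), if_pos hs]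
        rfl
      · rw [List.find?_cons_of_neg (by simp [pvP]; intro _; simpa using hs), if_neg hs]
        exact ih

-- two matching handles of the same length are the same string (both are prefixes of t)
theorem pvSameLen (t h1 h2 : String)
    (hp1 : PySem.Str.startswith t h1 = true) (hp2 : PySem.Str.startswith t h2 = true)
    (hl : PySem.Str.len h1 = PySem.Str.len h2) : h1 = h2 := by
  have p1 : h1.toList <+: t.toList := by
    have := hp1; rw [PySem.Str.startswith_eq] at this
    exact (PySem.Chars.startswith_iff t.toList h1.toList).mp this
  have p2 : h2.toList <+: t.toList := by
    have := hp2; rw [PySem.Str.startswith_eq] at this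
    exact (PySem.Chars.startswith_iff t.toList h2.toList).mp this
  have hlen : h1.toList.length = h2.toList.length := by
    simp only [PySem.Str.len_eq] at hl
    simp only [String.length_toList]
    exact_mod_cast hl
  apply String.toList_inj.mp
  rw [List.prefix_iff_eq_take.mp p1, List.prefix_iff_eq_take.mp p2, hlen]

-- a fold starting at a maximal matcher never changes
theorem pvFoldKeep (t : String) (l : List (String × String)) (b : String × String)
    (hmax : ∀ hp ∈ l, pvP t hp.1 = true → PySem.Str.len hp.1 ≤ PySem.Str.len b.1) :
    l.foldl (pvStepB t) (some b) = some b := by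
  induction l with
  | nil => rfl
  | cons hp rest ih =>
    have hstep : pvStepB t (some b) hp = some b := by
      cases hc : pvP t hp.1 with
      | false => exact pvStepB_false t _ hp hc
      | true =>
        rw [pvStepB_true_some t b hp hc,
          if_neg (not_lt.mpr (hmax hp List.mem_cons_self hc))]
    rw [List.foldl_cons, hstep]
    exact ih (fun x hx h => hmax x (List.mem_cons_of_mem _ hx) h)

-- no matcher: the fold keeps its accumulator
theorem pvFoldNone (t : String) (l : List (String × String)) (acc : Option (String × String))
    (hno : ∀ hp ∈ l, pvP t hp.1 = false) :
    l.foldl (pvStepB t) acc = acc := by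
  induction l with
  | nil => rfl
  | cons hp rest ih =>
    rw [List.foldl_cons, pvStepB_false t acc hp (hno hp List.mem_cons_self)]
    exact ih (fun x hx => hno x (List.mem_cons_of_mem _ hx))

-- the fold returns the unique maximal matcher
theorem pvFoldMain (t : String) (l : List (String × String)) (acc : Option (String × String))
    (h0 p0 : String)
    (hmem : (h0, p0) ∈ l) (hP : pvP t h0 = true)
    (hmax : ∀ hp ∈ l, pvP t hp.1 = true → PySem.Str.len hp.1 ≤ PySem.Str.len h0)
    (huni : ∀ hp ∈ l, pvP t hp.1 = true → PySem.Str.len hp.1 = PySem.Str.len h0 → hp = (h0, p0))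
    (hacc : acc = none ∨ ∃ b, acc = some b ∧ PySem.Str.len b.1 < PySem.Str.len h0) :
    l.foldl (pvStepB t) acc = some (h0, p0) := by
  induction l generalizing acc with
  | nil => cases hmem
  | cons hp rest ih =>
    rw [List.foldl_cons]
    by_cases heq : hp = (h0, p0)
    · subst heq
      have hstep : pvStepB t acc (h0, p0) = some (h0, p0) := by
        rcases hacc with h | ⟨b, hb, hlt⟩
        · subst h; exact pvStepB_true_none t (h0, p0) hP
        · subst hb
          rw [pvStepB_true_some t b (h0, p0) hP, if_pos hlt]
      rw [hstep]
      exact pvFoldKeep t rest (h0, p0)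
        (fun x hx h => hmax x (List.mem_cons_of_mem _ hx) h)
    · have hmem' : (h0, p0) ∈ rest := by
        rcases List.mem_cons.mp hmem with h | h
        · exact absurd h.symm heq
        · exact h
      cases hc : pvP t hp.1 with
      | false =>
        rw [pvStepB_eq, hc]
        exact ih acc hmem'
          (fun x hx h => hmax x (List.mem_cons_of_mem _ hx) h)
          (fun x hx h hl => huni x (List.mem_cons_of_mem _ hx) h hl) hacc
      | true =>
        have hle := hmax hp List.mem_cons_self hc
        have hne : PySem.Str.len hp.1 ≠ PySem.Str.len h0 := fun h =>
          heq (huni hp List.mem_cons_self hc h)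
        have hlt : PySem.Str.len hp.1 < PySem.Str.len h0 := lt_of_le_of_ne hle hne
        have hacc' : ∃ b, pvStepB t acc hp = some b ∧ PySem.Str.len b.1 < PySem.Str.len h0 := by
          rcases hacc with h2 | ⟨b, hb, hblt⟩
          · subst h2; exact ⟨hp, pvStepB_true_none t hp hc, hlt⟩
          · subst hb; rw [pvStepB_true_some t b hp hc]
            by_cases hbl : PySem.Str.len b.1 < PySem.Str.len hp.1
            · exact ⟨hp, by rw [if_pos hbl], hlt⟩
            · exact ⟨b, by rw [if_neg hbl], hblt⟩
        exact ih (pvStepB t acc hp) hmem'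
          (fun x hx h => hmax x (List.mem_cons_of_mem _ hx) h)
          (fun x hx h hl => huni x (List.mem_cons_of_mem _ hx) h hl)
          (Or.inr hacc')

-- the central fact: A's loop-plus-fallback result equals B's scan result, over the same dict
theorem pvCore (t : String) (ths : List (String × String)) :
    (match pvLoopA t (PySem.Dict.ofList ths)
        (PySem.List.sorted (PySem.Dict.ofList ths).keys (fun h => PySem.Str.len h) true) with
     | some r => some r
     | none =>
       if PySem.Str.startswith t "!" && (PySem.Dict.ofList ths).contains "!" then
         if (PySem.Dict.ofList ths).getD "!" "" != "!" then
           some ((PySem.Dict.ofList ths).getD "!" "" ++ PySem.Str.slice t (some 1) none)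
         else some t
       else some t)
    = (match (PySem.Dict.ofList ths).items.foldl (pvStepB t) none with
       | some b => some (b.2 ++ PySem.Str.slice t (some (PySem.Str.len b.1)) none)
       | none => some t) := by
  set d := PySem.Dict.ofList ths with hd
  have hnd : d.keys.Nodup := by rw [hd]; exact PySem.Dict.nodup_keys_ofList ths
  rw [pvLoopA_eq_find]
  cases hF : List.find? (pvP t) (PySem.List.sorted d.keys (fun h => PySem.Str.len h) true) with
  | none =>
    have hno : ∀ h ∈ d.keys, pvP t h = false := by
      intro h hm
      have := List.find?_eq_none.mp hF h
        ((PySem.List.mem_sorted d.keys (fun h => PySem.Str.len h) true h).mpr hm)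
      simpa using this
    have hcond : (PySem.Str.startswith t "!" && d.contains "!") = false := by
      cases hc : d.contains "!" with
      | false => simp
      | true =>
        have hm : "!" ∈ d.keys := (PySem.Dict.contains_iff_mem_keys d "!").mp hc
        have := hno "!" hm
        simp [pvP] at this
        simp [this]
    have hfold : d.items.foldl (pvStepB t) none = none :=
      pvFoldNone t d.items none
        (fun hp hm => hno hp.1 (PySem.Dict.mem_keys_of_mem_items d hm))
    rw [hfold, hcond]
    simp
  | some h0 =>
    have hPb : pvP t h0 = true := List.find?_some hF
    obtain ⟨-, as, bs, hsplit, hnotas⟩ := List.find?_eq_some_iff_append.mp hF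
    have hpw := PySem.List.sorted_pairwise_rev d.keys (fun h => PySem.Str.len h)
    rw [hsplit] at hpw
    have hmaxk : ∀ h ∈ d.keys, pvP t h = true → PySem.Str.len h ≤ PySem.Str.len h0 := by
      intro h hm hPh
      have hms : h ∈ PySem.List.sorted d.keys (fun h => PySem.Str.len h) true :=
        (PySem.List.mem_sorted d.keys (fun h => PySem.Str.len h) true h).mpr hm
      rw [hsplit] at hms
      rcases List.mem_append.mp hms with hin | hin
      · exact absurd hPh (by simpa using hnotas h hin)
      · rcases List.mem_cons.mp hin with rfl | hin
        · exact le_refl _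
        · exact (List.pairwise_cons.mp (List.pairwise_append.mp hpw).2.1).1 h hin
    have hks : h0 ∈ d.keys := by
      have : h0 ∈ PySem.List.sorted d.keys (fun h => PySem.Str.len h) true :=
        List.mem_of_find?_eq_some hF
      exact (PySem.List.mem_sorted d.keys (fun h => PySem.Str.len h) true h0).mp this
    obtain ⟨hp0, hin0, hfst⟩ := List.mem_map.mp (by simpa only [PySem.Dict.keys] using hks)
    have hpairmem : (h0, hp0.2) ∈ d.items := by rw [← hfst]; simpa using hin0
    have hgetD : d.getD h0 "" = hp0.2 := PySem.Dict.getD_of_mem_items d hpairmem hnd ""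
    have hmaxi : ∀ hp ∈ d.items, pvP t hp.1 = true → PySem.Str.len hp.1 ≤ PySem.Str.len h0 :=
      fun hp hm h => hmaxk hp.1 (PySem.Dict.mem_keys_of_mem_items d hm) h
    have huni : ∀ hp ∈ d.items, pvP t hp.1 = true →
        PySem.Str.len hp.1 = PySem.Str.len h0 → hp = (h0, hp0.2) := by
      intro hp hm hPh hl
      have h1 : hp.1 = h0 :=
        pvSameLen t hp.1 h0 (by simp [pvP] at hPh; simpa using hPh.2)
          (by simp [pvP] at hPb; simpa using hPb.2) hl
      have e1 : d.get? hp.1 = some hp.2 := PySem.Dict.get?_of_mem_items d hm hnd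
      have e2 : d.get? h0 = some hp0.2 := PySem.Dict.get?_of_mem_items d hpairmem hnd
      rw [h1, e2] at e1
      have h2 : hp.2 = hp0.2 := by injection e1.symm
      calc hp = (hp.1, hp.2) := rfl
        _ = (h0, hp0.2) := by rw [h1, h2]
    have hfold : d.items.foldl (pvStepB t) none = some (h0, hp0.2) :=
      pvFoldMain t d.items none h0 hp0.2 hpairmem hPb hmaxi huni (Or.inl rfl)
    rw [hfold]
    simp [hgetD]

-- ===== VERDICT (by name: the statement is the Claim_ definition above) =====
theorem resolve_tag_handle_py_spec : Claim_equal_resolve_tag_handle_py := by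
  intro tag ths _
  unfold Spec_resolve_tag_handle_py
  cases tag with
  | none => rfl
  | some t =>
    simp only [resolve_tag_handle_py, resolve_tag_handle_py_alt]
    by_cases h1 : (PySem.Dict.ofList ths : PySem.Dict String String).size = 0
    · rw [if_pos h1, if_pos h1]
    · rw [if_neg h1, if_neg h1]
      by_cases h2 : (PySem.Str.startswith t "tag:" || PySem.Str.startswith t "http:"
          || PySem.Str.startswith t "https:") = true
      · rw [if_pos h2, if_pos h2]
      · rw [if_neg h2, if_neg h2]
        exact pvCore t ths
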